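-- pv_equiv track=rewrite | github.com/nordeim/Flash-Chatbot | src/services/message_formatter.py | format_conversation_stats
-- ===== SOURCE A (Python) =====
-- from typing import List, Optional, Dict, Any
--
-- def format_conversation_stats(
--     messages: List[Dict[str, Any]]
-- ) -> Dict[str, int]:
--     """Calculate conversation statistics.
--
--     Args:
--         messages: Conversation messages
--
--     Returns:
--         Dictionary with statistics
--     """
--     user_count = sum(1 for m in messages if m.get("role") == "user")
--     assistant_count = sum(1 for m in messages if m.get("role") == "assistant")
--     total_chars = sum(len(m.get("content", "")) for m in messages)
--
--     return {
--         "user_messages": user_count,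
--         "assistant_messages": assistant_count,
--         "total_messages": len(messages),
--         "total_characters": total_chars
--     }
-- ===== SOURCE B (Python) =====
-- from typing import List, Dict, Any
--
-- def format_conversation_stats(messages: List[Dict[str, Any]]) -> Dict[str, int]:
--     user_count = 0
--     assistant_count = 0
--     total_chars = 0
--     for m in messages:
--         role = m.get("role")
--         if role == "user":
--             user_count += 1
--         elif role == "assistant":
--             assistant_count += 1
--         total_chars += len(m.get("content", ""))
--     return {
--         "user_messages": user_count,
--         "assistant_messages": assistant_count,
--         "total_messages": len(messages),
--         "total_characters": total_chars
--     }
-- ===== Notes on version B (the rewrite author's own statement) =====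
-- stated objective: alternative
-- what changed: Replaced A's three independent comprehension passes over messages with a single for-loop maintaining three accumulators (user count, assistant count, character total) in one traversal.
import Mathlib
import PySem

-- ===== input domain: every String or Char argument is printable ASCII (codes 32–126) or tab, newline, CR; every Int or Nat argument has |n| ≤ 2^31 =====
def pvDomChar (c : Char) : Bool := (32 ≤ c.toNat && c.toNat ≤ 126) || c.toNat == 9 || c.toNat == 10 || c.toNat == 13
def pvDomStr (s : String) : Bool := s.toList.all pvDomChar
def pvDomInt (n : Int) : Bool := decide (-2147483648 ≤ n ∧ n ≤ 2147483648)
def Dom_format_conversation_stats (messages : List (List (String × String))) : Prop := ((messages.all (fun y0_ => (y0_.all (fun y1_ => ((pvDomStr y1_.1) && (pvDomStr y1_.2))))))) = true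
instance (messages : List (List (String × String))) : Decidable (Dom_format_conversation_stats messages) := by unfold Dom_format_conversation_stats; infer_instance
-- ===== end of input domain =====

-- B replaces A's three separate passes over messages with one loop carrying three accumulators; return value unchanged.

-- ===== PORT A =====
-- three separate passes, each a fold over messages, exactly as A's comprehensions
def format_conversation_stats (messages : List (List (String × String))) : List (String × Int) :=
  let user_count : Int := messages.foldl
    (fun acc m => if (PySem.Dict.mk m).get? "role" = some "user" then acc + 1 else acc) 0
  let assistant_count : Int := messages.foldl
    (fun acc m => if (PySem.Dict.mk m).get? "role" = some "assistant" then acc + 1 else acc) 0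
  let total_chars : Int := messages.foldl
    (fun acc m => acc + PySem.Str.len ((PySem.Dict.mk m).getD "content" "")) 0
  [("user_messages", user_count),
   ("assistant_messages", assistant_count),
   ("total_messages", (messages.length : Int)),
   ("total_characters", total_chars)]

-- ===== PORT B =====
-- single pass: one recursion over messages carrying the three accumulators
def fcsLoop : List (List (String × String)) → Int × Int × Int → Int × Int × Int
  | [], acc => acc
  | m :: rest, (u, a, c) =>
      let role := (PySem.Dict.mk m).get? "role"
      let c' := c + PySem.Str.len ((PySem.Dict.mk m).getD "content" "")
      if role = some "user" then fcsLoop rest (u + 1, a, c')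
      else if role = some "assistant" then fcsLoop rest (u, a + 1, c')
      else fcsLoop rest (u, a, c')

def format_conversation_stats_alt (messages : List (List (String × String))) : List (String × Int) :=
  let r := fcsLoop messages (0, 0, 0)
  [("user_messages", r.1),
   ("assistant_messages", r.2.1),
   ("total_messages", (messages.length : Int)),
   ("total_characters", r.2.2)]

-- ===== PRECONDITION & SPEC =====
def Spec_format_conversation_stats (messages : List (List (String × String))) (out : List (String × Int)) : Prop := out = format_conversation_stats_alt messages
instance (messages : List (List (String × String))) (out : List (String × Int)) : Decidable (Spec_format_conversation_stats messages out) := by unfold Spec_format_conversation_stats; infer_instance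

-- ===== CLAIM (what is proved, stated in full; the proofs are below) =====
def Claim_equal_format_conversation_stats : Prop := ∀ (messages : List (List (String × String))), Dom_format_conversation_stats messages → Spec_format_conversation_stats messages (format_conversation_stats messages)

-- ===== LEMMAS AND PROOFS =====

-- shift lemma for A's counting folds
theorem fcs_foldl_if_shift (P : List (String × String) → Prop) [DecidablePred P]
    (s : Int) (xs : List (List (String × String))) :
    xs.foldl (fun acc m => if P m then acc + 1 else acc) s
      = s + xs.foldl (fun acc m => if P m then acc + 1 else acc) 0 := by
  induction xs generalizing s with
  | nil => simp
  | cons x xs ih =>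
    simp only [List.foldl_cons]
    rw [ih, ih (if P x then 0 + 1 else 0)]
    split <;> omega

-- shift lemma for A's character-sum fold
theorem fcs_foldl_add_shift (g : List (String × String) → Int)
    (s : Int) (xs : List (List (String × String))) :
    xs.foldl (fun acc m => acc + g m) s = s + xs.foldl (fun acc m => acc + g m) 0 := by
  induction xs generalizing s with
  | nil => simp
  | cons x xs ih =>
    simp only [List.foldl_cons]
    rw [ih, ih (0 + g x)]
    omega

-- the single-pass loop computes the three folds, shifted by its accumulators
theorem fcsLoop_eq (xs : List (List (String × String))) (u a c : Int) :
    fcsLoop xs (u, a, c)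
      = (u + xs.foldl (fun acc m => if (PySem.Dict.mk m).get? "role" = some "user" then acc + 1 else acc) 0,
         a + xs.foldl (fun acc m => if (PySem.Dict.mk m).get? "role" = some "assistant" then acc + 1 else acc) 0,
         c + xs.foldl (fun acc m => acc + PySem.Str.len ((PySem.Dict.mk m).getD "content" "")) 0) := by
  induction xs generalizing u a c with
  | nil => simp [fcsLoop]
  | cons m rest ih =>
    simp only [fcsLoop, List.foldl_cons]
    rw [fcs_foldl_if_shift (fun m => (PySem.Dict.mk m).get? "role" = some "user")
          (if (PySem.Dict.mk m).get? "role" = some "user" then (0:Int) + 1 else 0),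
        fcs_foldl_if_shift (fun m => (PySem.Dict.mk m).get? "role" = some "assistant")
          (if (PySem.Dict.mk m).get? "role" = some "assistant" then (0:Int) + 1 else 0),
        fcs_foldl_add_shift (fun m => PySem.Str.len ((PySem.Dict.mk m).getD "content" ""))
          ((0:Int) + PySem.Str.len ((PySem.Dict.mk m).getD "content" ""))]
    by_cases hu : (PySem.Dict.mk m).get? "role" = some "user"
    · have ha : ¬ (PySem.Dict.mk m).get? "role" = some "assistant" := by rw [hu]; simp
      simp only [if_pos hu, if_neg ha, ih, Prod.mk.injEq]
      refine ⟨by omega, by omega, by omega⟩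
    · by_cases ha : (PySem.Dict.mk m).get? "role" = some "assistant"
      · simp only [if_neg hu, if_pos ha, ih, Prod.mk.injEq]
        refine ⟨by omega, by omega, by omega⟩
      · simp only [if_neg hu, if_neg ha, ih, Prod.mk.injEq]
        refine ⟨by omega, by omega, by omega⟩

-- ===== VERDICT (by name: the statement is the Claim_ definition above) =====
theorem format_conversation_stats_spec : Claim_equal_format_conversation_stats := by
  intro messages _
  unfold Spec_format_conversation_stats format_conversation_stats format_conversation_stats_alt
  rw [fcsLoop_eq]
  simp
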